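-- pv_equiv track=rewrite | github.com/pypi-data/pypi-mirror-384 | packages/mock-spark/mock_spark-2.2.0.tar.gz/mock_spark-2.2.0/mock_spark/core/ddl_parser.py | _split_ddl_fields
-- ===== SOURCE A (Python) =====
-- from typing import List
--
-- def _split_ddl_fields(ddl_string: str) -> List[str]:
--     """Split DDL string into individual field definitions.
--
--     Handles nested structures like struct<>, array<>, map<>, and decimal().
--
--     Args:
--         ddl_string: DDL string with multiple fields
--
--     Returns:
--         List of field definition strings
--     """
--     fields = []
--     current_field = ""
--     angle_depth = 0  # Track < and >
--     paren_depth = 0  # Track ( and )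
--     i = 0
--
--     while i < len(ddl_string):
--         char = ddl_string[i]
--
--         if char == "<":
--             angle_depth += 1
--             current_field += char
--         elif char == ">":
--             angle_depth -= 1
--             current_field += char
--         elif char == "(":
--             paren_depth += 1
--             current_field += char
--         elif char == ")":
--             paren_depth -= 1
--             current_field += char
--         elif char == "," and angle_depth == 0 and paren_depth == 0:
--             if current_field.strip():
--                 fields.append(current_field.strip())
--             current_field = ""
--         else:
--             current_field += char
--
--         i += 1
--
--     # Add the last field
--     if current_field.strip():
--         fields.append(current_field.strip())
--
--     return fields
-- ===== SOURCE B (Python) =====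
-- from typing import List
--
-- def _split_ddl_fields(ddl_string: str) -> List[str]:
--     """Split DDL string into top-level field definitions (two-phase:
--     find comma boundary positions, then slice the original string)."""
--     bounds = []
--     angle = 0
--     paren = 0
--     for i, ch in enumerate(ddl_string):
--         if ch == "<":
--             angle += 1
--         elif ch == ">":
--             angle -= 1
--         elif ch == "(":
--             paren += 1
--         elif ch == ")":
--             paren -= 1
--         elif ch == "," and angle == 0 and paren == 0:
--             bounds.append(i)
--     starts = [0] + [p + 1 for p in bounds]
--     ends = bounds + [len(ddl_string)]
--     segments = [ddl_string[a:b].strip() for a, b in zip(starts, ends)]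
--     return [s for s in segments if s]
-- ===== Notes on version B (the rewrite author's own statement) =====
-- stated objective: faster
-- what changed: B replaces A's per-character string-buffer accumulation with a two-phase index computation: a first pass records the positions of top-level commas, a second phase slices the original string at those boundaries, strips each slice and drops empty ones.
import Mathlib
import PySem

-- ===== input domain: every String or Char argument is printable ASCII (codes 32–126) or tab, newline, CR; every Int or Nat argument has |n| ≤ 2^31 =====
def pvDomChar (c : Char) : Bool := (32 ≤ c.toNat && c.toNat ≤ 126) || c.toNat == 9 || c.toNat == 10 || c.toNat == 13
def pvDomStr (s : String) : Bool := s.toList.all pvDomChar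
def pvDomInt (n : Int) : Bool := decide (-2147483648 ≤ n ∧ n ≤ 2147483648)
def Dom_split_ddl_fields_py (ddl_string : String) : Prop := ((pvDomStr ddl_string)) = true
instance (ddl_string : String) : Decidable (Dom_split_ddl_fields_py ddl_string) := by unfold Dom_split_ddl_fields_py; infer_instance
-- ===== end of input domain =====

-- B replaces A's per-character buffer accumulation by a two-phase boundary-positions-then-slice computation, avoiding A's quadratic 'current_field += char' buffer copying (objective: faster, measured).
-- Both ports work on s.toList (PySem string functions are defined on List Char) and convert back with String.ofList at the end.

-- ===== PORT A =====
-- state: (fields, current_field, angle_depth, paren_depth)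
def pvAStep (st : List (List Char) × List Char × Int × Int) (c : Char) :
    List (List Char) × List Char × Int × Int :=
  match st with
  | (fields, cur, ad, pd) =>
    if c = '<' then (fields, cur ++ [c], ad + 1, pd)
    else if c = '>' then (fields, cur ++ [c], ad - 1, pd)
    else if c = '(' then (fields, cur ++ [c], ad, pd + 1)
    else if c = ')' then (fields, cur ++ [c], ad, pd - 1)
    else if c = ',' ∧ ad = 0 ∧ pd = 0 then
      ((if PySem.Chars.strip cur ≠ [] then fields ++ [PySem.Chars.strip cur] else fields),
       ([] : List Char), ad, pd)
    else (fields, cur ++ [c], ad, pd)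

def split_ddl_fields_py (ddl_string : String) : List String :=
  let st := ddl_string.toList.foldl pvAStep ([], [], 0, 0)
  -- "add the last field"
  let fields := if PySem.Chars.strip st.2.1 ≠ [] then st.1 ++ [PySem.Chars.strip st.2.1] else st.1
  fields.map String.ofList

-- ===== PORT B =====
-- first pass of Source B: positions of top-level commas (i is the enumerate index)
def pvBBounds : List Char → Nat → Int → Int → List Nat
  | [], _, _, _ => []
  | c :: rest, i, ad, pd =>
    if c = '<' then pvBBounds rest (i + 1) (ad + 1) pd
    else if c = '>' then pvBBounds rest (i + 1) (ad - 1) pd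
    else if c = '(' then pvBBounds rest (i + 1) ad (pd + 1)
    else if c = ')' then pvBBounds rest (i + 1) ad (pd - 1)
    else if c = ',' ∧ ad = 0 ∧ pd = 0 then i :: pvBBounds rest (i + 1) ad pd
    else pvBBounds rest (i + 1) ad pd

-- ddl_string[a:b] for the Nat bounds Source B uses: Python clamps exactly as drop/take do
-- (PySem.List.slice_natCast: slice xs a b = (xs.drop a).take (b - a))
def pvBSeg (cs : List Char) (a b : Nat) : List Char := (cs.drop a).take (b - a)

def split_ddl_fields_py_alt (ddl_string : String) : List String :=
  let cs := ddl_string.toList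
  let bs := pvBBounds cs 0 0 0
  let starts := 0 :: bs.map (· + 1)
  let ends := bs ++ [cs.length]
  let segments := (starts.zip ends).map (fun p => PySem.Chars.strip (pvBSeg cs p.1 p.2))
  (segments.filter (· ≠ [])).map String.ofList

-- ===== PRECONDITION & SPEC =====
def Spec_split_ddl_fields_py (ddl_string : String) (out : List String) : Prop := out = split_ddl_fields_py_alt ddl_string
instance (ddl_string : String) (out : List String) : Decidable (Spec_split_ddl_fields_py ddl_string out) := by unfold Spec_split_ddl_fields_py; infer_instance

-- ===== CLAIM (what is proved, stated in full; the proofs are below) =====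
def Claim_equal_split_ddl_fields_py : Prop := ∀ (ddl_string : String), Dom_split_ddl_fields_py ddl_string → Spec_split_ddl_fields_py ddl_string (split_ddl_fields_py ddl_string)


-- ===== LEMMAS AND PROOFS =====

-- common reference shape: (first segment, later segments) of the top-level comma split
def pvSplitTop : List Char → Int → Int → List Char × List (List Char)
  | [], _, _ => ([], [])
  | c :: rest, ad, pd =>
    if c = '<' then let p := pvSplitTop rest (ad + 1) pd; (c :: p.1, p.2)
    else if c = '>' then let p := pvSplitTop rest (ad - 1) pd; (c :: p.1, p.2)
    else if c = '(' then let p := pvSplitTop rest ad (pd + 1); (c :: p.1, p.2)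
    else if c = ')' then let p := pvSplitTop rest ad (pd - 1); (c :: p.1, p.2)
    else if c = ',' ∧ ad = 0 ∧ pd = 0 then ([], let p := pvSplitTop rest ad pd; p.1 :: p.2)
    else let p := pvSplitTop rest ad pd; (c :: p.1, p.2)

def pvFinish (l : List (List Char)) : List (List Char) :=
  (l.map PySem.Chars.strip).filter (· ≠ [])

def pvAFinish (st : List (List Char) × List Char × Int × Int) : List (List Char) :=
  if PySem.Chars.strip st.2.1 ≠ [] then st.1 ++ [PySem.Chars.strip st.2.1] else st.1

lemma pvA_loop (cs : List Char) : ∀ (fields : List (List Char)) (cur : List Char) (ad pd : Int),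
    pvAFinish (cs.foldl pvAStep (fields, cur, ad, pd))
      = fields ++ pvFinish ((cur ++ (pvSplitTop cs ad pd).1) :: (pvSplitTop cs ad pd).2) := by
  induction cs with
  | nil =>
    intro fields cur ad pd
    simp only [List.foldl_nil, pvAFinish, pvSplitTop, pvFinish, List.map_cons, List.map_nil,
      List.filter, List.append_nil]
    split_ifs with h <;> simp [h]
  | cons c rest ih =>
    intro fields cur ad pd
    simp only [List.foldl_cons, pvAStep, pvSplitTop]
    split_ifs with h1 h2 h3 h4 h5 h6
    · simp [ih, List.append_assoc]
    · simp [ih, List.append_assoc]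
    · simp [ih, List.append_assoc]
    · simp [ih, List.append_assoc]
    · rw [ih]; simp [pvFinish, h6, List.append_assoc]
    · rw [ih]; simp [pvFinish, h6]
    · simp [ih, List.append_assoc]

-- B-side: recursive form of the slicing phase (L is the final end bound)
def pvSegsAux (cs : List Char) (L : Nat) : Nat → List Nat → List (List Char)
  | s, [] => [pvBSeg cs s L]
  | s, b :: bt => pvBSeg cs s b :: pvSegsAux cs L (b + 1) bt

lemma pvBSeg_cons (c : Char) (cs : List Char) (a b : Nat) :
    pvBSeg (c :: cs) (a + 1) (b + 1) = pvBSeg cs a b := by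
  simp [pvBSeg]

lemma pvBSeg_zero_cons (c : Char) (cs : List Char) (b : Nat) :
    pvBSeg (c :: cs) 0 (b + 1) = c :: pvBSeg cs 0 b := by
  simp [pvBSeg]

lemma pvSegsRaw_eq_aux (cs : List Char) (L : Nat) (bs : List Nat) : ∀ (s : Nat),
    ((s :: bs.map (· + 1)).zip (bs ++ [L])).map (fun p => pvBSeg cs p.1 p.2)
      = pvSegsAux cs L s bs := by
  induction bs with
  | nil => intro s; simp [pvSegsAux]
  | cons b bt ih => intro s; simp only [List.map_cons, List.cons_append, List.zip_cons_cons,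
      List.map_cons, pvSegsAux]; rw [ih]

lemma pvSegsAux_cons (c : Char) (cs : List Char) (L : Nat) (bs : List Nat) : ∀ (s : Nat),
    pvSegsAux (c :: cs) (L + 1) (s + 1) (bs.map (· + 1)) = pvSegsAux cs L s bs := by
  induction bs with
  | nil => intro s; simp [pvSegsAux, pvBSeg_cons]
  | cons b bt ih => intro s; simp only [List.map_cons, pvSegsAux, pvBSeg_cons, ih]

lemma pvSegsAux_zero_shift (c : Char) (cs : List Char) (L : Nat) (bs : List Nat) :
    pvSegsAux (c :: cs) (L + 1) 0 (bs.map (· + 1)) =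
      (c :: (pvSegsAux cs L 0 bs).headI) :: (pvSegsAux cs L 0 bs).tail := by
  cases bs with
  | nil => simp [pvSegsAux, pvBSeg_zero_cons]
  | cons b bt =>
    simp only [List.map_cons, pvSegsAux, pvBSeg_zero_cons, List.headI, List.tail]
    rw [pvSegsAux_cons c cs L bt (b + 1)]

lemma pvBounds_shift (cs : List Char) : ∀ (i : Nat) (ad pd : Int),
    pvBBounds cs i ad pd = (pvBBounds cs 0 ad pd).map (· + i) := by
  induction cs with
  | nil => intro i ad pd; simp [pvBBounds]
  | cons c rest ih =>
    intro i ad pd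
    simp only [pvBBounds]
    split_ifs with h1 h2 h3 h4 h5 <;>
      [skip; skip; skip; skip;
       (rw [ih (i + 1), ih 1, List.map_cons, List.map_map]
        refine congrArg₂ _ (by omega) (List.map_congr_left ?_)
        intro a _; simp; omega);
       skip] <;>
      (rw [ih (i + 1), ih 1, List.map_map]
       refine List.map_congr_left ?_
       intro a _; simp; omega)

-- zip/slice form of Source B's second phase
def pvSegsRaw (cs : List Char) (bs : List Nat) : List (List Char) :=
  ((0 :: bs.map (· + 1)).zip (bs ++ [cs.length])).map (fun p => pvBSeg cs p.1 p.2)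

lemma pvB_step_noncomma (c : Char) (rest : List Char) (ad pd : Int)
    (ih : pvSegsRaw rest (pvBBounds rest 0 ad pd)
            = (pvSplitTop rest ad pd).1 :: (pvSplitTop rest ad pd).2) :
    ((0 :: (pvBBounds rest 1 ad pd).map (· + 1)).zip
        (pvBBounds rest 1 ad pd ++ [rest.length + 1])).map
        (fun p => pvBSeg (c :: rest) p.1 p.2)
      = (c :: (pvSplitTop rest ad pd).1) :: (pvSplitTop rest ad pd).2 := by
  rw [pvSegsRaw, pvSegsRaw_eq_aux] at ih
  rw [pvBounds_shift rest 1, pvSegsRaw_eq_aux, pvSegsAux_zero_shift, ih]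
  rfl

lemma pvB_step_comma (c : Char) (rest : List Char) (ad pd : Int)
    (ih : pvSegsRaw rest (pvBBounds rest 0 ad pd)
            = (pvSplitTop rest ad pd).1 :: (pvSplitTop rest ad pd).2) :
    ((0 :: ((0 :: pvBBounds rest 1 ad pd).map (· + 1))).zip
        ((0 :: pvBBounds rest 1 ad pd) ++ [rest.length + 1])).map
        (fun p => pvBSeg (c :: rest) p.1 p.2)
      = [] :: (pvSplitTop rest ad pd).1 :: (pvSplitTop rest ad pd).2 := by
  rw [pvSegsRaw, pvSegsRaw_eq_aux] at ih
  rw [pvBounds_shift rest 1, pvSegsRaw_eq_aux]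
  simp only [pvSegsAux]
  rw [pvSegsAux_cons c rest rest.length (pvBBounds rest 0 ad pd) 0, ih]
  simp [pvBSeg]

lemma pvB_seg (cs : List Char) : ∀ (ad pd : Int),
    pvSegsRaw cs (pvBBounds cs 0 ad pd) = (pvSplitTop cs ad pd).1 :: (pvSplitTop cs ad pd).2 := by
  induction cs with
  | nil => intro ad pd; simp [pvSegsRaw, pvBBounds, pvSplitTop, pvBSeg]
  | cons c rest ih =>
    intro ad pd
    simp only [pvSegsRaw, pvBBounds, pvSplitTop, List.length_cons]
    split_ifs with h1 h2 h3 h4 h5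
    · exact pvB_step_noncomma c rest _ _ (ih _ _)
    · exact pvB_step_noncomma c rest _ _ (ih _ _)
    · exact pvB_step_noncomma c rest _ _ (ih _ _)
    · exact pvB_step_noncomma c rest _ _ (ih _ _)
    · exact pvB_step_comma c rest _ _ (ih _ _)
    · exact pvB_step_noncomma c rest _ _ (ih _ _)

-- ===== VERDICT (by name: the statement is the Claim_ definition above) =====
theorem split_ddl_fields_py_spec : Claim_equal_split_ddl_fields_py := by
  intro s _
  have hA := pvA_loop s.toList [] [] 0 0
  have hB := pvB_seg s.toList 0 0
  simp only [pvAFinish, List.nil_append] at hA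
  simp only [pvSegsRaw] at hB
  have hB2 : ((0 :: (pvBBounds s.toList 0 0 0).map (· + 1)).zip
        ((pvBBounds s.toList 0 0 0) ++ [s.toList.length])).map
        (fun p => PySem.Chars.strip (pvBSeg s.toList p.1 p.2))
      = List.map PySem.Chars.strip
          ((pvSplitTop s.toList 0 0).1 :: (pvSplitTop s.toList 0 0).2) := by
    rw [← hB, List.map_map]; rfl
  unfold Spec_split_ddl_fields_py split_ddl_fields_py split_ddl_fields_py_alt
  dsimp only
  rw [hA, hB2]
  simp [pvFinish]
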